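-- pv_equiv track=rewrite | github.com/francescamcgovern-debug/dinneroo-analysis | scripts/phase2_analysis/01_score_dishes.py | estimate_fussy_eater
-- ===== SOURCE A (Python) =====
-- def estimate_fussy_eater(dish_type):
--     """Estimate fussy eater friendliness based on dish type."""
--     very_friendly = ['Pizza', 'Pasta', 'Mac & Cheese', 'Chicken', 'Fish & Chips',
--                      'Burger', 'Fajitas', 'Katsu']
--     friendly = ['Rice Bowl', 'Noodles', 'Teriyaki', 'Fried Rice', 'Grilled Chicken']
--     neutral = ['Curry', 'Lasagne', 'Stir Fry', 'Shawarma']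
--     challenging = ['Pho', 'Ramen', 'Sushi', 'Thai', 'Biryani', 'Korean']
--
--     dish_lower = dish_type.lower()
--
--     for d in very_friendly:
--         if d.lower() in dish_lower:
--             return 5
--     for d in friendly:
--         if d.lower() in dish_lower:
--             return 4
--     for d in neutral:
--         if d.lower() in dish_lower:
--             return 3
--     for d in challenging:
--         if d.lower() in dish_lower:
--             return 2
--
--     return 3  # Default
-- ===== SOURCE B (Python) =====
-- _SCORES = {
--     'pizza': 5, 'pasta': 5, 'mac & cheese': 5, 'chicken': 5, 'fish & chips': 5,
--     'burger': 5, 'fajitas': 5, 'katsu': 5,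
--     'rice bowl': 4, 'noodles': 4, 'teriyaki': 4, 'fried rice': 4, 'grilled chicken': 4,
--     'curry': 3, 'lasagne': 3, 'stir fry': 3, 'shawarma': 3,
--     'pho': 2, 'ramen': 2, 'sushi': 2, 'thai': 2, 'biryani': 2, 'korean': 2,
-- }
--
-- def estimate_fussy_eater(dish_type):
--     """Estimate fussy eater friendliness based on dish type."""
--     dish_lower = dish_type.lower()
--     scores = [s for k, s in _SCORES.items() if k in dish_lower]
--     return max(scores) if scores else 3
-- ===== Notes on version B (the rewrite author's own statement) =====
-- stated objective: simpler
-- what changed: Replaces A's four hard-coded tier lists with four early-return scan loops by one flat keyword-to-score table and a single filter-then-max pass (default 3 when nothing matches); correct because the tier scores decrease with priority, so the max of all matching scores equals the first-matching-tier value.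
import Mathlib
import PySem

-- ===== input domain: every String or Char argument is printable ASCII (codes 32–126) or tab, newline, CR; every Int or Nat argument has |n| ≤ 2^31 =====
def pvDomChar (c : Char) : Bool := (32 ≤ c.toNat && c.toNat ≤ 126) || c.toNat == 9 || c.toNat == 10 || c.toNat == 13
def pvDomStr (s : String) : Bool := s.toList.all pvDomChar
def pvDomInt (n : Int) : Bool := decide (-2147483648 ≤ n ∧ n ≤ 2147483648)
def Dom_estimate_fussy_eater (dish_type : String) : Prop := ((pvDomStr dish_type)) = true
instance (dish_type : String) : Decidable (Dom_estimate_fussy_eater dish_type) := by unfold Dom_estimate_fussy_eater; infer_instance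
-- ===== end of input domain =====

-- B replaces A's four early-return tier loops by one flat keyword→score table and a single
-- max-aggregation pass (objective: simpler); the tier scores are strictly decreasing in
-- priority order, so the max of all matches equals A's first-matching-tier value.

-- ===== PORT A =====
-- early-return 'for d in ks: if d.lower() in dish_lower: return score'
def pvTierScan (dish_lower : String) (ks : List String) (score : Int) : Option Int :=
  match ks with
  | [] => none
  | d :: rest =>
      if PySem.Str.isIn (PySem.Str.lower d) dish_lower then some score
      else pvTierScan dish_lower rest score

def estimate_fussy_eater (dish_type : String) : Int :=
  let very_friendly := ["Pizza", "Pasta", "Mac & Cheese", "Chicken", "Fish & Chips",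
                        "Burger", "Fajitas", "Katsu"]
  let friendly := ["Rice Bowl", "Noodles", "Teriyaki", "Fried Rice", "Grilled Chicken"]
  let neutral := ["Curry", "Lasagne", "Stir Fry", "Shawarma"]
  let challenging := ["Pho", "Ramen", "Sushi", "Thai", "Biryani", "Korean"]
  let dish_lower := PySem.Str.lower dish_type
  match pvTierScan dish_lower very_friendly 5 with
  | some r => r
  | none =>
    match pvTierScan dish_lower friendly 4 with
    | some r => r
    | none =>
      match pvTierScan dish_lower neutral 3 with
      | some r => r
      | none =>
        match pvTierScan dish_lower challenging 2 with
        | some r => r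
        | none => 3

-- ===== PORT B =====
def pvScoreTable : List (String × Int) :=
  [("pizza", 5), ("pasta", 5), ("mac & cheese", 5), ("chicken", 5), ("fish & chips", 5),
   ("burger", 5), ("fajitas", 5), ("katsu", 5),
   ("rice bowl", 4), ("noodles", 4), ("teriyaki", 4), ("fried rice", 4), ("grilled chicken", 4),
   ("curry", 3), ("lasagne", 3), ("stir fry", 3), ("shawarma", 3),
   ("pho", 2), ("ramen", 2), ("sushi", 2), ("thai", 2), ("biryani", 2), ("korean", 2)]

def estimate_fussy_eater_alt (dish_type : String) : Int :=
  let dish_lower := PySem.Str.lower dish_type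
  let scores := (pvScoreTable.filter (fun kv => PySem.Str.isIn kv.1 dish_lower)).map Prod.snd
  match scores with
  | [] => 3
  | x :: xs => xs.foldl max x

-- ===== PRECONDITION & SPEC =====
def Spec_estimate_fussy_eater (dish_type : String) (out : Int) : Prop := out = estimate_fussy_eater_alt dish_type
instance (dish_type : String) (out : Int) : Decidable (Spec_estimate_fussy_eater dish_type out) := by unfold Spec_estimate_fussy_eater; infer_instance

-- ===== CLAIM (what is proved, stated in full; the proofs are below) =====
def Claim_equal_estimate_fussy_eater : Prop := ∀ (dish_type : String), Dom_estimate_fussy_eater dish_type → Spec_estimate_fussy_eater dish_type (estimate_fussy_eater dish_type)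

-- ===== LEMMAS AND PROOFS =====

-- the nested-if value both ports are reduced to
def pvNested (b5 b4 b3 b2 : Bool) : Int :=
  if b5 then 5 else if b4 then 4 else if b3 then 3 else if b2 then 2 else 3

lemma pvTierScan_eq (dl : String) (ks : List String) (s : Int) :
    pvTierScan dl ks s =
      if ks.any (fun d => PySem.Str.isIn (PySem.Str.lower d) dl) then some s else none := by
  induction ks with
  | nil => simp [pvTierScan]
  | cons d rest ih =>
      simp only [pvTierScan, List.any_cons, ih]
      by_cases h : PySem.Chars.isIn (PySem.Chars.lower d.toList) dl.toList = true <;> simp [h]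

lemma pvGroup_nil {q : String → Bool} {ks : List String} (h : ks.any q = false) (v : Int) :
    ((ks.map (fun k => (k, v))).filter (fun kv => q kv.1)).map Prod.snd = [] := by
  simp only [List.any_eq_false] at h
  have hf : ks.filter ((fun kv => q kv.1) ∘ fun k => (k, v)) = [] :=
    List.filter_eq_nil_iff.mpr (fun a ha => by simpa using h a ha)
  simp only [List.filter_map, hf, List.map_nil]

lemma pvGroup_mem {q : String → Bool} {ks : List String} (v y : Int)
    (hy : y ∈ ((ks.map (fun k => (k, v))).filter (fun kv => q kv.1)).map Prod.snd) : y = v := by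
  simp only [List.mem_map, List.mem_filter, List.mem_map] at hy
  obtain ⟨⟨k, w⟩, ⟨⟨a, _, hkw⟩, _⟩, hsnd⟩ := hy
  cases hkw; exact hsnd.symm

lemma pvGroup_cons {q : String → Bool} {ks : List String} (h : ks.any q = true) (v : Int) :
    ∃ l, ((ks.map (fun k => (k, v))).filter (fun kv => q kv.1)).map Prod.snd = v :: l := by
  rcases hg : ((ks.map (fun k => (k, v))).filter (fun kv => q kv.1)).map Prod.snd with _ | ⟨y, l⟩
  · exfalso
    simp only [List.any_eq_true] at h
    obtain ⟨k, hk, hq⟩ := h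
    have : v ∈ ((ks.map (fun k => (k, v))).filter (fun kv => q kv.1)).map Prod.snd := by
      simp only [List.mem_map, List.mem_filter, List.mem_map]
      exact ⟨(k, v), ⟨⟨k, hk, rfl⟩, hq⟩, rfl⟩
    rw [hg] at this; exact absurd this (List.not_mem_nil)
  · have := pvGroup_mem (q := q) (ks := ks) v y (by rw [hg]; exact List.mem_cons_self)
    exact ⟨l, by rw [hg, this]⟩

lemma pvFoldl_max_fix (x : Int) (xs : List Int) (h : ∀ y ∈ xs, y ≤ x) :
    xs.foldl max x = x := by
  induction xs with
  | nil => rfl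
  | cons y ys ih =>
      simp only [List.foldl_cons]
      rw [max_eq_left (h y List.mem_cons_self)]
      exact ih (fun z hz => h z (List.mem_cons_of_mem _ hz))

-- the keyword lists of A, lowercased, are exactly the key groups of B's table
lemma pvKeys5 : ["Pizza", "Pasta", "Mac & Cheese", "Chicken", "Fish & Chips", "Burger", "Fajitas", "Katsu"].map PySem.Str.lower = ["pizza", "pasta", "mac & cheese", "chicken", "fish & chips", "burger", "fajitas", "katsu"] := by decide
lemma pvKeys4 : ["Rice Bowl", "Noodles", "Teriyaki", "Fried Rice", "Grilled Chicken"].map PySem.Str.lower = ["rice bowl", "noodles", "teriyaki", "fried rice", "grilled chicken"] := by decide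
lemma pvKeys3 : ["Curry", "Lasagne", "Stir Fry", "Shawarma"].map PySem.Str.lower = ["curry", "lasagne", "stir fry", "shawarma"] := by decide
lemma pvKeys2 : ["Pho", "Ramen", "Sushi", "Thai", "Biryani", "Korean"].map PySem.Str.lower = ["pho", "ramen", "sushi", "thai", "biryani", "korean"] := by decide

lemma pvTable_grouped :
    pvScoreTable =
      ["pizza", "pasta", "mac & cheese", "chicken", "fish & chips", "burger", "fajitas", "katsu"].map (fun k => (k, (5 : Int))) ++
      ["rice bowl", "noodles", "teriyaki", "fried rice", "grilled chicken"].map (fun k => (k, (4 : Int))) ++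
      ["curry", "lasagne", "stir fry", "shawarma"].map (fun k => (k, (3 : Int))) ++
      ["pho", "ramen", "sushi", "thai", "biryani", "korean"].map (fun k => (k, (2 : Int))) := by
  rfl

lemma pvA_eq (dish_type : String) :
    estimate_fussy_eater dish_type =
      pvNested
        (["pizza", "pasta", "mac & cheese", "chicken", "fish & chips", "burger", "fajitas", "katsu"].any (fun k => PySem.Str.isIn k (PySem.Str.lower dish_type)))
        (["rice bowl", "noodles", "teriyaki", "fried rice", "grilled chicken"].any (fun k => PySem.Str.isIn k (PySem.Str.lower dish_type)))
        (["curry", "lasagne", "stir fry", "shawarma"].any (fun k => PySem.Str.isIn k (PySem.Str.lower dish_type)))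
        (["pho", "ramen", "sushi", "thai", "biryani", "korean"].any (fun k => PySem.Str.isIn k (PySem.Str.lower dish_type))) := by
  simp only [estimate_fussy_eater, pvTierScan_eq, pvNested,
    ← pvKeys5, ← pvKeys4, ← pvKeys3, ← pvKeys2, List.any_map]
  split_ifs <;> simp_all

lemma pvB_eq (dish_type : String) :
    estimate_fussy_eater_alt dish_type =
      pvNested
        (["pizza", "pasta", "mac & cheese", "chicken", "fish & chips", "burger", "fajitas", "katsu"].any (fun k => PySem.Str.isIn k (PySem.Str.lower dish_type)))
        (["rice bowl", "noodles", "teriyaki", "fried rice", "grilled chicken"].any (fun k => PySem.Str.isIn k (PySem.Str.lower dish_type)))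
        (["curry", "lasagne", "stir fry", "shawarma"].any (fun k => PySem.Str.isIn k (PySem.Str.lower dish_type)))
        (["pho", "ramen", "sushi", "thai", "biryani", "korean"].any (fun k => PySem.Str.isIn k (PySem.Str.lower dish_type))) := by
  set dl := PySem.Str.lower dish_type with hdl
  set q : String → Bool := fun k => PySem.Str.isIn k dl with hq
  have hsplit : (pvScoreTable.filter (fun kv => PySem.Str.isIn kv.1 dl)).map Prod.snd =
      (((["pizza", "pasta", "mac & cheese", "chicken", "fish & chips", "burger", "fajitas", "katsu"].map (fun k => (k, (5:Int)))).filter (fun kv => q kv.1)).map Prod.snd) ++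
      (((["rice bowl", "noodles", "teriyaki", "fried rice", "grilled chicken"].map (fun k => (k, (4:Int)))).filter (fun kv => q kv.1)).map Prod.snd) ++
      (((["curry", "lasagne", "stir fry", "shawarma"].map (fun k => (k, (3:Int)))).filter (fun kv => q kv.1)).map Prod.snd) ++
      (((["pho", "ramen", "sushi", "thai", "biryani", "korean"].map (fun k => (k, (2:Int)))).filter (fun kv => q kv.1)).map Prod.snd) := by
    rw [pvTable_grouped]
    simp only [hq, List.filter_append, List.map_append]
  simp only [estimate_fussy_eater_alt, ← hdl, hsplit, pvNested]
  by_cases h5 : ["pizza", "pasta", "mac & cheese", "chicken", "fish & chips", "burger", "fajitas", "katsu"].any q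
  · obtain ⟨l, hl⟩ := pvGroup_cons h5 (5 : Int)
    rw [hl]
    simp only [List.cons_append, if_pos h5]
    apply pvFoldl_max_fix
    intro y hy
    simp only [List.mem_append] at hy
    rcases hy with ((hy | hy) | hy) | hy
    · have := pvGroup_mem (q := q) 5 y (by rw [hl]; exact List.mem_cons_of_mem _ hy); omega
    · have := pvGroup_mem (q := q) 4 y hy; omega
    · have := pvGroup_mem (q := q) 3 y hy; omega
    · have := pvGroup_mem (q := q) 2 y hy; omega
  · rw [pvGroup_nil (Bool.eq_false_iff.mpr h5) 5]
    simp only [List.nil_append, if_neg h5]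
    by_cases h4 : ["rice bowl", "noodles", "teriyaki", "fried rice", "grilled chicken"].any q
    · obtain ⟨l, hl⟩ := pvGroup_cons h4 (4 : Int)
      rw [hl]
      simp only [List.cons_append, if_pos h4]
      apply pvFoldl_max_fix
      intro y hy
      simp only [List.mem_append] at hy
      rcases hy with (hy | hy) | hy
      · have := pvGroup_mem (q := q) 4 y (by rw [hl]; exact List.mem_cons_of_mem _ hy); omega
      · have := pvGroup_mem (q := q) 3 y hy; omega
      · have := pvGroup_mem (q := q) 2 y hy; omega
    · rw [pvGroup_nil (Bool.eq_false_iff.mpr h4) 4]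
      simp only [List.nil_append, if_neg h4]
      by_cases h3 : ["curry", "lasagne", "stir fry", "shawarma"].any q
      · obtain ⟨l, hl⟩ := pvGroup_cons h3 (3 : Int)
        rw [hl]
        simp only [List.cons_append, if_pos h3]
        apply pvFoldl_max_fix
        intro y hy
        simp only [List.mem_append] at hy
        rcases hy with hy | hy
        · have := pvGroup_mem (q := q) 3 y (by rw [hl]; exact List.mem_cons_of_mem _ hy); omega
        · have := pvGroup_mem (q := q) 2 y hy; omega
      · rw [pvGroup_nil (Bool.eq_false_iff.mpr h3) 3]
        simp only [List.nil_append, if_neg h3]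
        by_cases h2 : ["pho", "ramen", "sushi", "thai", "biryani", "korean"].any q
        · obtain ⟨l, hl⟩ := pvGroup_cons h2 (2 : Int)
          rw [hl]
          simp only [if_pos h2]
          exact pvFoldl_max_fix _ _ (fun y hy => by
            have := pvGroup_mem (q := q) 2 y (by rw [hl]; exact List.mem_cons_of_mem _ hy); omega)
        · rw [pvGroup_nil (Bool.eq_false_iff.mpr h2) 2]
          simp [h2]

-- ===== VERDICT (by name: the statement is the Claim_ definition above) =====
theorem estimate_fussy_eater_spec : Claim_equal_estimate_fussy_eater := by
  intro dish_type _
  unfold Spec_estimate_fussy_eater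
  rw [pvA_eq, pvB_eq]
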